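-- pv_equiv track=rewrite | github.com/tom9358/nllb-tryout | sidetracks/tsvdebug.py | select_best_gronings
-- ===== SOURCE A (Python) =====
-- def select_best_gronings(dutch_word, gronings_options, sorted_words):
--     max_freq = -1
--     best_gronings = None
--     for gronings_word in gronings_options:
--         # Find the frequency of the Gronings word in the sorted_words list
--         for word, freq in sorted_words:
--             if word == gronings_word:
--                 if freq > max_freq:
--                     max_freq = freq
--                     best_gronings = gronings_word
--                 break
--     # If no frequency match found, select the shortest option
--     if best_gronings is None:
--         best_gronings = min(gronings_options, key=len)
--     return best_gronings
-- ===== SOURCE B (Python) =====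
-- def select_best_gronings(dutch_word, gronings_options, sorted_words):
--     # Data-driven single pass: instead of scanning sorted_words once per option,
--     # walk sorted_words once, and whenever a word is an option seen for the first
--     # time, keep the running best by (frequency, earliest-option-position).
--     pos = {}
--     for i, g in enumerate(gronings_options):
--         if g not in pos:
--             pos[g] = i
--     seen = set()
--     best = None  # (key, word) with key = (freq, -first option position)
--     for word, freq in sorted_words:
--         if word in pos and word not in seen:
--             seen.add(word)
--             if freq > -1:
--                 key = (freq, -pos[word])
--                 if best is None or key > best[0]:
--                     best = (key, word)
--     if best is not None:
--         return best[1]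
--     return min(gronings_options, key=len)
-- ===== Notes on version B (the rewrite author's own statement) =====
-- stated objective: faster
-- what changed: Inverts the loop structure: instead of scanning sorted_words once per option with a running max, B builds an option-position index once and then walks sorted_words in a single pass, keeping the running best first-seen option word by the lexicographic key (frequency, earliest-option-position).
import Mathlib
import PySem

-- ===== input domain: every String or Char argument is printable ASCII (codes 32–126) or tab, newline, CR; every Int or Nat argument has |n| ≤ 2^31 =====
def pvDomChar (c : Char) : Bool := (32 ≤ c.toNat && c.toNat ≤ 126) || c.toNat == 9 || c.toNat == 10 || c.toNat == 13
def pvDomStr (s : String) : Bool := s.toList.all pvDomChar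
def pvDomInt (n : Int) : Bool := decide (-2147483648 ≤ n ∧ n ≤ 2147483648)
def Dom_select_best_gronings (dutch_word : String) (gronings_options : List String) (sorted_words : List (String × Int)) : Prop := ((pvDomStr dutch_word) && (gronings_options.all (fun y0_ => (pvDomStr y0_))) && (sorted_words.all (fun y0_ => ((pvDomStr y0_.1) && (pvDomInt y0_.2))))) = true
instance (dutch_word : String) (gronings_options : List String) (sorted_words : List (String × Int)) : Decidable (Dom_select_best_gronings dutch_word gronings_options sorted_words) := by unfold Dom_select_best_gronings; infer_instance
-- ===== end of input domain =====

-- B walks sorted_words once keeping the best (frequency, earliest-option-position) instead of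
-- scanning sorted_words per option (asymptotically faster; return value proved equal on Pre_).


-- ===== PORT A =====
-- inner 'for word, freq in sorted_words: if word == gronings_word: … break'
def pvInnerA (g : String) (st : Int × Option String) : List (String × Int) → Int × Option String
  | [] => st
  | (w, f) :: rest =>
    if w == g then (if f > st.1 then (f, some g) else st) else pvInnerA g st rest

def select_best_gronings (dutch_word : String) (gronings_options : List String) (sorted_words : List (String × Int)) : String :=
  match (gronings_options.foldl (fun st g => pvInnerA g st sorted_words) ((-1 : Int), (none : Option String))).2 with
  | some b => b
  | none => (PySem.List.min? gronings_options (fun s => PySem.Str.len s)).getD ""  -- min([]) raises: excluded by Pre_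

-- ===== PORT B =====
-- Python tuple comparison 'key > best[0]' on (int, int): strict lexicographic
def pvLexLt (a b : Int × Int) : Bool := a.1 < b.1 || (a.1 == b.1 && a.2 < b.2)

-- 'for i, g in enumerate(gronings_options): if g not in pos: pos[g] = i'
def pvPosDict (opts : List String) : PySem.Dict String Int :=
  (PySem.List.enumerate opts).foldl (fun d p => if d.contains p.2 then d else d.insert p.2 p.1) PySem.Dict.empty

-- body of 'for word, freq in sorted_words: …'
def pvStepB (pos : PySem.Dict String Int)
    (st : PySem.Set String × Option ((Int × Int) × String)) (p : String × Int) :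
    PySem.Set String × Option ((Int × Int) × String) :=
  if pos.contains p.1 && !(PySem.Set.contains st.1 p.1) then
    let seen := PySem.Set.add st.1 p.1
    if p.2 > -1 then
      -- 'pos[word]' always hits (contains checked); getD 0 is that lookup
      let key : Int × Int := (p.2, -((pos.get? p.1).getD 0))
      match st.2 with
      | none => (seen, some (key, p.1))
      | some b => if pvLexLt b.1 key then (seen, some (key, p.1)) else (seen, b)
    else (seen, st.2)
  else st

def select_best_gronings_alt (dutch_word : String) (gronings_options : List String) (sorted_words : List (String × Int)) : String :=
  match (sorted_words.foldl (pvStepB (pvPosDict gronings_options)) ((PySem.Set.ofList []), (none : Option ((Int × Int) × String)))).2 with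
  | some b => b.2
  | none => (PySem.List.min? gronings_options (fun s => PySem.Str.len s)).getD ""  -- min([]) raises: excluded by Pre_

-- ===== PRECONDITION & SPEC =====
-- A raises ValueError (min of an empty sequence) exactly when gronings_options is empty.
def Pre_select_best_gronings (dutch_word : String) (gronings_options : List String) (sorted_words : List (String × Int)) : Prop :=
  gronings_options ≠ []
instance (dutch_word : String) (gronings_options : List String) (sorted_words : List (String × Int)) : Decidable (Pre_select_best_gronings dutch_word gronings_options sorted_words) := by unfold Pre_select_best_gronings; infer_instance
def pvWitness_select_best_gronings : String × List String × (List (String × Int)) := ("huis", ["hoes", "hoys"], [("hoes", 3), ("hoys", 3)])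

def Spec_select_best_gronings (dutch_word : String) (gronings_options : List String) (sorted_words : List (String × Int)) (out : String) : Prop := out = select_best_gronings_alt dutch_word gronings_options sorted_words
instance (dutch_word : String) (gronings_options : List String) (sorted_words : List (String × Int)) (out : String) : Decidable (Spec_select_best_gronings dutch_word gronings_options sorted_words out) := by unfold Spec_select_best_gronings; infer_instance

-- ===== CLAIM (what is proved, stated in full; the proofs are below) =====
def Claim_equal_select_best_gronings : Prop := ∀ (dutch_word : String) (gronings_options : List String) (sorted_words : List (String × Int)), Dom_select_best_gronings dutch_word gronings_options sorted_words → Pre_select_best_gronings dutch_word gronings_options sorted_words → Spec_select_best_gronings dutch_word gronings_options sorted_words (select_best_gronings dutch_word gronings_options sorted_words)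

-- ===== LEMMAS AND PROOFS =====

-- first frequency of g in sw, -1 if absent (A's sentinel)
def pvFg (sw : List (String × Int)) (g : String) : Int :=
  ((sw.find? (fun p => p.1 == g)).map (fun p => p.2)).getD (-1)

-- first index of g in a list (junk 0 past the end)
def pvIdx : List String → String → Nat
  | [], _ => 0
  | x :: xs, g => if x = g then 0 else pvIdx xs g + 1

-- the canonical selection key: (first frequency, minus first option position)
def pvKey (opts : List String) (sw : List (String × Int)) (g : String) : Int × Int :=
  (pvFg sw g, -(pvIdx opts g : Int))

def pvLexLtP (a b : Int × Int) : Prop := a.1 < b.1 ∨ (a.1 = b.1 ∧ a.2 < b.2)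

lemma pvLexLt_iff (a b : Int × Int) : pvLexLt a b = true ↔ pvLexLtP a b := by
  unfold pvLexLt pvLexLtP
  constructor
  · intro h; simp at h; omega
  · intro h; simp; omega

lemma pvIdx_inj (opts : List String) (w c : String) (hw : w ∈ opts) (hc : c ∈ opts)
    (h : pvIdx opts w = pvIdx opts c) : w = c := by
  induction opts with
  | nil => cases hw
  | cons x xs ih =>
    simp only [pvIdx] at h
    split_ifs at h with hxw hxc hxc
    · exact hxw.symm.trans hxc
    · have hw' : w ∈ xs := by
        rcases List.mem_cons.mp hw with h1 | h1
        · exact absurd h1.symm hxw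
        · exact h1
      have hc' : c ∈ xs := by
        rcases List.mem_cons.mp hc with h1 | h1
        · exact absurd h1.symm hxc
        · exact h1
      exact ih hw' hc' (by omega)

lemma pvIdx_append_self (p1 p2 : List String) (c : String) (h : c ∉ p1) :
    pvIdx (p1 ++ c :: p2) c = p1.length := by
  induction p1 with
  | nil => simp [pvIdx]
  | cons x xs ih =>
    have hxc : x ≠ c := by rintro rfl; exact h List.mem_cons_self
    have hx : c ∉ xs := fun hm => h (List.mem_cons_of_mem _ hm)
    simp [pvIdx, hxc, ih hx]

lemma pvIdx_append_other (p1 p2 : List String) (c d : String) (h1 : d ∉ p1) (h2 : d ≠ c) :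
    pvIdx (p1 ++ c :: p2) d = p1.length + 1 + pvIdx p2 d := by
  induction p1 with
  | nil =>
    have hcd : c ≠ d := fun he => h2 he.symm
    simp only [List.nil_append, pvIdx, if_neg hcd, List.length_nil]
    omega
  | cons x xs ih =>
    have hxd : x ≠ d := by rintro rfl; exact h1 List.mem_cons_self
    have hx : d ∉ xs := fun hm => h1 (List.mem_cons_of_mem _ hm)
    simp only [List.cons_append, pvIdx, if_neg hxd, ih hx, List.length_cons]
    omega

lemma pvFg_not_mem (sw : List (String × Int)) (g : String) (h : g ∉ sw.map Prod.fst) :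
    pvFg sw g = -1 := by
  unfold pvFg
  have : sw.find? (fun p => p.1 == g) = none := by
    apply List.find?_eq_none.mpr
    intro p hp hbeq
    exact h (List.mem_map.mpr ⟨p, hp, eq_of_beq hbeq⟩)
  simp [this]

lemma pvFg_first (q l : List (String × Int)) (w : String) (f : Int)
    (h : w ∉ q.map Prod.fst) : pvFg (q ++ (w, f) :: l) w = f := by
  unfold pvFg
  have hq : q.find? (fun p => p.1 == w) = none := by
    apply List.find?_eq_none.mpr
    intro p hp hbeq
    exact h (List.mem_map.mpr ⟨p, hp, eq_of_beq hbeq⟩)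
  rw [List.find?_append, hq]
  simp

-- ---- the position dict ----
lemma pvAnyFind {α : Type} (p : α → Bool) (l : List α) : l.any p = (l.find? p).isSome := by
  induction l with
  | nil => rfl
  | cons a t ih => cases h : p a <;> simp [h, ih]

lemma pvPosFold_get (l : List (Int × String)) (d : PySem.Dict String Int) (g : String) :
    (l.foldl (fun d p => if d.contains p.2 then d else d.insert p.2 p.1) d).get? g
      = ((d.get? g).orElse (fun _ => (l.find? (fun p => p.2 == g)).map (fun p => p.1))) := by
  induction l generalizing d with
  | nil => cases h : d.get? g <;> simp [Option.orElse, h]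
  | cons p rest ih =>
    obtain ⟨i, w⟩ := p
    by_cases hc : d.contains w
    · simp only [List.foldl_cons, hc, if_pos]
      rw [ih]
      by_cases hw : (w == g)
      · have hg : d.contains g := by
          have := eq_of_beq hw; subst this; exact hc
        have : (d.get? g).isSome := by
          simp only [PySem.Dict.get?, Option.isSome_map, List.find?_isSome]
          simpa [PySem.Dict.contains] using hg
        obtain ⟨v, hv⟩ := Option.isSome_iff_exists.mp this
        simp [hv, Option.orElse]
      · simp [hw]
    · simp only [List.foldl_cons, hc, if_neg, Bool.false_eq_true, not_false_iff]
      rw [ih]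
      have hins : (d.insert w i).get? g = (d.get? g).orElse (fun _ => if w == g then some i else none) := by
        simp [PySem.Dict.insert, hc, PySem.Dict.get?, List.find?_append]
        cases hfind : List.find? (fun p => p.1 == g) d.items with
        | some v => simp
        | none =>
          by_cases hw : (w == g) <;> simp
      rw [hins]
      by_cases hw : (w == g)
      · cases hdg : d.get? g <;> simp [Option.orElse, hw]
      · cases hdg : d.get? g <;> simp [Option.orElse, hw]

lemma pvEnumFind (opts : List String) (g : String) : ∀ (s : Int),
    ((PySem.List.enumerate opts s).find? (fun p => p.2 == g)).map (fun p => p.1)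
      = if g ∈ opts then some (s + (pvIdx opts g : Int)) else none := by
  induction opts with
  | nil => intro s; simp [PySem.List.enumerate_nil]
  | cons x xs ih =>
    intro s
    rw [PySem.List.enumerate_cons]
    by_cases hx : (x = g)
    · subst hx; simp [pvIdx]
    · have hbx : ((x == g) = false) := beq_false_of_ne hx
      rw [show List.find? (fun p => p.2 == g) ((s, x) :: PySem.List.enumerate xs (s + 1))
            = List.find? (fun p => p.2 == g) (PySem.List.enumerate xs (s + 1)) from by simp [hbx]]
      rw [ih (s + 1)]
      by_cases hm : g ∈ xs
      · have hmc : g ∈ x :: xs := List.mem_cons_of_mem _ hm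
        simp only [hm, hmc, if_pos, pvIdx, if_neg hx]
        push_cast
        ring_nf
      · have hmc : g ∉ x :: xs := by
          intro hg
          rcases List.mem_cons.mp hg with h' | h'
          · exact hx h'.symm
          · exact hm h'
        simp [hm, hmc]

lemma pvPosDict_get (opts : List String) (g : String) :
    (pvPosDict opts).get? g = if g ∈ opts then some ((pvIdx opts g : Int)) else none := by
  unfold pvPosDict
  rw [pvPosFold_get]
  have h0 : (PySem.Dict.empty : PySem.Dict String Int).get? g = none := rfl
  rw [h0]
  have := pvEnumFind opts g 0
  simp only [zero_add] at this
  simpa [Option.orElse] using this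

lemma pvPosDict_contains (opts : List String) (g : String) :
    (pvPosDict opts).contains g = decide (g ∈ opts) := by
  have h := pvPosDict_get opts g
  have hc : (pvPosDict opts).contains g = ((pvPosDict opts).get? g).isSome := by
    simp only [PySem.Dict.contains, PySem.Dict.get?, Option.isSome_map]
    exact pvAnyFind _ _
  rw [hc, h]
  by_cases hm : g ∈ opts <;> simp [hm]

-- ---- A-side characterization ----
def pvStepA (sw : List (String × Int)) (st : Int × Option String) (g : String) : Int × Option String :=
  if pvFg sw g > st.1 then (pvFg sw g, some g) else st

-- A's inner scan in terms of pvFg (needs the invariant -1 ≤ st.1)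
lemma pvInnerA_eq (g : String) (st : Int × Option String) (sw : List (String × Int))
    (h : -1 ≤ st.1) :
    pvInnerA g st sw = if pvFg sw g > st.1 then (pvFg sw g, some g) else st := by
  induction sw with
  | nil =>
    simp [pvInnerA, pvFg]
    omega
  | cons p rest ih =>
    obtain ⟨w, f⟩ := p
    by_cases hw : (w == g)
    · simp [pvInnerA, hw, pvFg]
    · simp [pvInnerA, hw, ih, pvFg]

lemma pvFoldA_eq (sw : List (String × Int)) :
    ∀ (l : List String) (st : Int × Option String), -1 ≤ st.1 →
    l.foldl (fun st g => pvInnerA g st sw) st = l.foldl (pvStepA sw) st := by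
  intro l
  induction l with
  | nil => intro st _; rfl
  | cons g rest ih =>
    intro st h
    simp only [List.foldl_cons]
    rw [pvInnerA_eq g st sw h]
    have h' : -1 ≤ (pvStepA sw st g).1 := by
      unfold pvStepA
      by_cases hg : pvFg sw g > st.1
      · rw [if_pos hg]; show -1 ≤ pvFg sw g; omega
      · rw [if_neg hg]; exact h
    rw [show (if pvFg sw g > st.1 then (pvFg sw g, some g) else st) = pvStepA sw st g from rfl]
    exact ih _ h'

def InvA (sw : List (String × Int)) (p : List String) (st : Int × Option String) : Prop :=
  (st = (-1, none) ∧ ∀ x ∈ p, pvFg sw x ≤ -1) ∨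
  (∃ c p1 p2, st = (pvFg sw c, some c) ∧ pvFg sw c > -1 ∧ p = p1 ++ c :: p2 ∧
     (∀ x ∈ p1, pvFg sw x < pvFg sw c) ∧ (∀ x ∈ p2, pvFg sw x ≤ pvFg sw c))

lemma InvA_step (sw : List (String × Int)) (p : List String) (st : Int × Option String)
    (h : InvA sw p st) (x : String) : InvA sw (p ++ [x]) (pvStepA sw st x) := by
  rcases h with ⟨hst, hall⟩ | ⟨c, p1, p2, hst, hc, hp, h1, h2⟩
  · subst hst
    unfold pvStepA
    by_cases hx : pvFg sw x > -1
    · right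
      refine ⟨x, p, [], ?_, hx, rfl, fun y hy => lt_of_le_of_lt (hall y hy) hx, by simp⟩
      simp [hx]
    · left
      constructor
      · simp at hx ⊢; omega
      · intro y hy
        rcases List.mem_append.mp hy with h | h
        · exact hall y h
        · simp at h; subst h; omega
  · subst hst hp
    unfold pvStepA
    by_cases hx : pvFg sw x > pvFg sw c
    · right
      refine ⟨x, p1 ++ c :: p2, [], ?_, by omega, by simp, ?_, by simp⟩
      · simp [hx]
      · intro y hy
        rcases List.mem_append.mp hy with h | h
        · exact lt_trans (h1 y h) hx
        · rcases List.mem_cons.mp h with h | h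
          · subst h; exact hx
          · exact lt_of_le_of_lt (h2 y h) hx
    · right
      refine ⟨c, p1, p2 ++ [x], ?_, hc, by simp, h1, ?_⟩
      · simp at hx; simp [not_lt.mpr hx]
      · intro y hy
        rcases List.mem_append.mp hy with h | h
        · exact h2 y h
        · simp at h; subst h; omega

lemma InvA_fold (sw : List (String × Int)) :
    ∀ (l p : List String) (st : Int × Option String), InvA sw p st →
    InvA sw (p ++ l) (l.foldl (pvStepA sw) st) := by
  intro l
  induction l with
  | nil => intro p st h; simpa using h
  | cons x xs ih =>
    intro p st h
    have := ih (p ++ [x]) (pvStepA sw st x) (InvA_step sw p st h x)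
    simpa using this

-- ---- B-side characterization ----
def InvB (opts : List String) (sw : List (String × Int)) (q : List (String × Int))
    (st : PySem.Set String × Option ((Int × Int) × String)) : Prop :=
  (∀ w, w ∈ st.1 ↔ (w ∈ opts ∧ w ∈ q.map Prod.fst)) ∧
  ((st.2 = none ∧ ∀ w, w ∈ opts → w ∈ q.map Prod.fst → pvFg sw w ≤ -1) ∨
   (∃ c, st.2 = some (pvKey opts sw c, c) ∧ c ∈ opts ∧ c ∈ q.map Prod.fst ∧ pvFg sw c > -1 ∧
      ∀ w, w ∈ opts → w ∈ q.map Prod.fst → w ≠ c → pvFg sw w > -1 →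
        pvLexLtP (pvKey opts sw w) (pvKey opts sw c)))

lemma pvLex_total (opts : List String) (sw : List (String × Int)) (w c : String)
    (hw : w ∈ opts) (hc : c ∈ opts) (hne : w ≠ c)
    (h : ¬ pvLexLtP (pvKey opts sw c) (pvKey opts sw w)) :
    pvLexLtP (pvKey opts sw w) (pvKey opts sw c) := by
  have hidx : pvIdx opts w ≠ pvIdx opts c := fun he => hne (pvIdx_inj opts w c hw hc he)
  unfold pvLexLtP pvKey at *
  simp at *
  omega

lemma InvB_noop (opts : List String) (sw : List (String × Int)) (q : List (String × Int))
    (w : String) (f : Int) (st : PySem.Set String × Option ((Int × Int) × String))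
    (hcase : w ∉ opts ∨ w ∈ q.map Prod.fst)
    (h : InvB opts sw q st) : InvB opts sw (q ++ [(w, f)]) st := by
  obtain ⟨hseen, hbest⟩ := h
  have hmem : ∀ y, (y ∈ opts ∧ y ∈ (q ++ [(w, f)]).map Prod.fst) ↔ (y ∈ opts ∧ y ∈ q.map Prod.fst) := by
    intro y
    simp only [List.map_append, List.map_cons, List.map_nil, List.mem_append, List.mem_cons,
      List.not_mem_nil, or_false]
    constructor
    · rintro ⟨h1, h2 | h2⟩
      · exact ⟨h1, h2⟩
      · subst h2
        rcases hcase with hc | hc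
        · exact absurd h1 hc
        · exact ⟨h1, hc⟩
    · rintro ⟨h1, h2⟩; exact ⟨h1, Or.inl h2⟩
  refine ⟨fun y => (hseen y).trans (hmem y).symm, ?_⟩
  rcases hbest with ⟨hn, hall⟩ | ⟨c, hsome, hc1, hc2, hc3, hall⟩
  · exact Or.inl ⟨hn, fun y hy hym => hall y hy ((hmem y).mp ⟨hy, hym⟩).2⟩
  · exact Or.inr ⟨c, hsome, hc1, ((hmem c).mpr ⟨hc1, hc2⟩).2, hc3,
      fun y hy hym hyne hyfg => hall y hy ((hmem y).mp ⟨hy, hym⟩).2 hyne hyfg⟩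

lemma InvB_step (opts : List String) (sw : List (String × Int))
    (q l : List (String × Int)) (w : String) (f : Int)
    (hsw : sw = q ++ (w, f) :: l)
    (st : PySem.Set String × Option ((Int × Int) × String))
    (h : InvB opts sw q st) :
    InvB opts sw (q ++ [(w, f)]) (pvStepB (pvPosDict opts) st (w, f)) := by
  obtain ⟨hseen, hbest⟩ := h
  by_cases hwo : w ∈ opts
  · by_cases hws : w ∈ q.map Prod.fst
    · -- already seen: state unchanged
      have hcont : PySem.Set.contains st.1 w = true :=
        (PySem.Set.contains_iff _ _).mpr ((hseen w).mpr ⟨hwo, hws⟩)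
      have hred : pvStepB (pvPosDict opts) st (w, f) = st := by
        unfold pvStepB
        simp [pvPosDict_contains]
        intro _ hmem
        exact absurd ((hseen w).mpr ⟨hwo, hws⟩) hmem
      rw [hred]
      exact InvB_noop opts sw q w f st (Or.inr hws) ⟨hseen, hbest⟩
    · -- first occurrence of an option word
      have hcont : PySem.Set.contains st.1 w = false := by
        cases hcb : PySem.Set.contains st.1 w
        · rfl
        · exact absurd ((hseen w).mp ((PySem.Set.contains_iff _ _).mp hcb)).2 hws
      have hfg : pvFg sw w = f := by rw [hsw]; exact pvFg_first q l w f hws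
      have hkey : ((pvPosDict opts).get? w).getD 0 = (pvIdx opts w : Int) := by
        rw [pvPosDict_get]; simp [hwo]
      have hKK : ((f : Int), -((pvPosDict opts).get? w).getD 0) = pvKey opts sw w := by
        rw [hkey]; simp [pvKey, hfg]
      have hsplit : ∀ y, y ∈ (q ++ [(w, f)]).map Prod.fst ↔ (y ∈ q.map Prod.fst ∨ y = w) := by
        intro y; simp
      have hseen' : ∀ y, y ∈ PySem.Set.add st.1 w ↔ (y ∈ opts ∧ y ∈ (q ++ [(w, f)]).map Prod.fst) := by
        intro y
        rw [PySem.Set.mem_add, hseen y, hsplit y]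
        constructor
        · rintro (⟨h1, h2⟩ | h')
          · exact ⟨h1, Or.inl h2⟩
          · subst h'; exact ⟨hwo, Or.inr rfl⟩
        · rintro ⟨h1, h2 | h2⟩
          · exact Or.inl ⟨h1, h2⟩
          · exact Or.inr h2
      by_cases hf : f > -1
      · rcases hbest with ⟨hn, hall⟩ | ⟨c, hsome, hc1, hc2, hc3, hall⟩
        · -- no best yet: w becomes best
          have hred : pvStepB (pvPosDict opts) st (w, f)
              = (PySem.Set.add st.1 w, some (pvKey opts sw w, w)) := by
            unfold pvStepB
            simp only [pvPosDict_contains, hn]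
            simp [hwo, hf, hKK]
            intro hmem
            exact absurd ((hseen w).mp hmem).2 hws
          rw [hred]
          refine ⟨hseen', Or.inr ⟨w, rfl, hwo, (hsplit w).mpr (Or.inr rfl), by omega, ?_⟩⟩
          intro y hy hym hyne hyfg
          rcases (hsplit y).mp hym with h' | h'
          · exact absurd hyfg (by have := hall y hy h'; omega)
          · exact absurd h' hyne
        · -- a best c exists
          by_cases hlt : pvLexLt (pvKey opts sw c) (pvKey opts sw w) = true
          · -- w beats c
            have hred : pvStepB (pvPosDict opts) st (w, f)
                = (PySem.Set.add st.1 w, some (pvKey opts sw w, w)) := by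
              unfold pvStepB
              simp only [pvPosDict_contains, hsome]
              simp [hwo, hf, hKK, hlt]
              intro hmem
              exact absurd ((hseen w).mp hmem).2 hws
            rw [hred]
            refine ⟨hseen', Or.inr ⟨w, rfl, hwo, (hsplit w).mpr (Or.inr rfl), by omega, ?_⟩⟩
            intro y hy hym hyne hyfg
            have hltP : pvLexLtP (pvKey opts sw c) (pvKey opts sw w) := (pvLexLt_iff _ _).mp hlt
            rcases (hsplit y).mp hym with h' | h'
            · by_cases hyc : y = c
              · exact hyc ▸ hltP
              · have := hall y hy h' hyc hyfg
                unfold pvLexLtP at *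
                omega
            · exact absurd h' hyne
          · -- c stays best
            have hred : pvStepB (pvPosDict opts) st (w, f)
                = (PySem.Set.add st.1 w, some (pvKey opts sw c, c)) := by
              unfold pvStepB
              simp only [pvPosDict_contains, hsome]
              simp [hwo, hf, hKK, hlt]
              intro hmem
              exact absurd ((hseen w).mp hmem).2 hws
            rw [hred]
            refine ⟨hseen', Or.inr ⟨c, rfl, hc1, (hsplit c).mpr (Or.inl hc2), hc3, ?_⟩⟩
            intro y hy hym hyne hyfg
            rcases (hsplit y).mp hym with h' | h'
            · exact hall y hy h' hyne hyfg
            · subst h'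
              apply pvLex_total opts sw y c hy hc1 hyne
              intro hcy
              exact hlt ((pvLexLt_iff _ _).mpr hcy)
      · -- f ≤ -1: w is seen but can never become best
        have hred : pvStepB (pvPosDict opts) st (w, f) = (PySem.Set.add st.1 w, st.2) := by
          unfold pvStepB
          simp [pvPosDict_contains, hwo, hf]
          intro hmem
          exact absurd ((hseen w).mp hmem).2 hws
        rw [hred]
        refine ⟨hseen', ?_⟩
        rcases hbest with ⟨hn, hall⟩ | ⟨c, hsome, hc1, hc2, hc3, hall⟩
        · left
          refine ⟨hn, fun y hy hym => ?_⟩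
          rcases (hsplit y).mp hym with h' | h'
          · exact hall y hy h'
          · rw [h', hfg]; omega
        · right
          refine ⟨c, hsome, hc1, (hsplit c).mpr (Or.inl hc2), hc3, fun y hy hym hyne hyfg => ?_⟩
          rcases (hsplit y).mp hym with h' | h'
          · exact hall y hy h' hyne hyfg
          · exfalso; rw [h', hfg] at hyfg; exact hf hyfg
  · -- not an option word: state unchanged
    have hred : pvStepB (pvPosDict opts) st (w, f) = st := by
      unfold pvStepB
      simp [pvPosDict_contains, hwo]
    rw [hred]
    exact InvB_noop opts sw q w f st (Or.inl hwo) ⟨hseen, hbest⟩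

lemma InvB_fold (opts : List String) (sw : List (String × Int)) :
    ∀ (l q : List (String × Int)) (st : PySem.Set String × Option ((Int × Int) × String)),
    sw = q ++ l → InvB opts sw q st →
    InvB opts sw (q ++ l) (l.foldl (pvStepB (pvPosDict opts)) st) := by
  intro l
  induction l with
  | nil => intro q st _ h; simpa using h
  | cons p xs ih =>
    intro q st hsw h
    obtain ⟨w, f⟩ := p
    have hstep := InvB_step opts sw q xs w f (by simpa using hsw) st h
    have := ih (q ++ [(w, f)]) (pvStepB (pvPosDict opts) st (w, f)) (by simpa using hsw) hstep
    simpa using this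

-- ---- bridge: A's split characterization implies strict lex-maximality ----
lemma pvA_max (sw : List (String × Int)) (c : String) (p1 p2 : List String)
    (h1 : ∀ x ∈ p1, pvFg sw x < pvFg sw c) (h2 : ∀ x ∈ p2, pvFg sw x ≤ pvFg sw c)
    (w : String) (hw : w ∈ p1 ++ c :: p2) (hne : w ≠ c) :
    pvLexLtP (pvKey (p1 ++ c :: p2) sw w) (pvKey (p1 ++ c :: p2) sw c) := by
  have hcnp1 : c ∉ p1 := fun hm => absurd (h1 c hm) (lt_irrefl _)
  have hidxc : pvIdx (p1 ++ c :: p2) c = p1.length := pvIdx_append_self p1 p2 c hcnp1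
  rcases List.mem_append.mp hw with hm | hm
  · -- w ∈ p1: strictly smaller frequency
    left
    simp [pvKey]
    exact h1 w hm
  · rcases List.mem_cons.mp hm with hm | hm
    · exact absurd hm hne
    · -- w ∈ p2
      by_cases hfw : pvFg sw w < pvFg sw c
      · left; simp [pvKey]; exact hfw
      · have hfe : pvFg sw w = pvFg sw c := le_antisymm (h2 w hm) (not_lt.mp hfw)
        right
        have hwnp1 : w ∉ p1 := fun hmw => absurd (hfe ▸ h1 w hmw) (lt_irrefl _)
        have hidxw : pvIdx (p1 ++ c :: p2) w = p1.length + 1 + pvIdx p2 w :=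
          pvIdx_append_other p1 p2 c w hwnp1 hne
        constructor
        · simp [pvKey, hfe]
        · simp [pvKey, hidxc, hidxw]
          omega

-- ===== VERDICT (by name: the statement is the Claim_ definition above) =====
theorem select_best_gronings_spec : Claim_equal_select_best_gronings := by
  intro dutch_word opts sw _ _
  unfold Spec_select_best_gronings select_best_gronings select_best_gronings_alt
  -- A side
  have hA0 : InvA sw [] ((-1 : Int), (none : Option String)) := Or.inl ⟨rfl, by simp⟩
  rw [pvFoldA_eq sw opts ((-1 : Int), none) (by simp)]
  have hA := InvA_fold sw opts [] ((-1 : Int), none) hA0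
  simp only [List.nil_append] at hA
  -- B side
  have hB0 : InvB opts sw [] ((PySem.Set.ofList []), (none : Option ((Int × Int) × String))) := by
    constructor
    · intro w; simp [PySem.Set.ofList]
    · left; exact ⟨rfl, by simp⟩
  have hB := InvB_fold opts sw sw [] _ (by simp) hB0
  simp only [List.nil_append] at hB
  set stA := opts.foldl (pvStepA sw) ((-1 : Int), none) with hstA
  set stB := sw.foldl (pvStepB (pvPosDict opts)) ((PySem.Set.ofList []), none) with hstB
  obtain ⟨_, hBbest⟩ := hB
  rcases hA with ⟨hAst, hAall⟩ | ⟨c, p1, p2, hAst, hAc, hAp, hA1, hA2⟩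
  · -- A found nothing: no option has positive first frequency
    rcases hBbest with ⟨hBn, _⟩ | ⟨c, hBsome, hc1, _, hc3, _⟩
    · rw [hAst, hBn]
    · exact absurd hc3 (by have := hAall c hc1; omega)
  · rcases hBbest with ⟨hBn, hBall⟩ | ⟨c', hBsome, hc1, _, hc3, hBmax⟩
    · -- B found nothing but A found c: contradiction
      exfalso
      have hcm : c ∈ sw.map Prod.fst := by
        by_contra hx
        exact absurd (pvFg_not_mem sw c hx) (by omega)
      have hco : c ∈ opts := by rw [hAp]; exact List.mem_append.mpr (Or.inr List.mem_cons_self)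
      exact absurd hAc (by have := hBall c hco hcm; omega)
    · -- both found: unique strict lex maximum
      rw [hAst, hBsome]
      simp only
      have hco : c ∈ opts := by rw [hAp]; exact List.mem_append.mpr (Or.inr List.mem_cons_self)
      by_cases hcc : c = c'
      · rw [hcc]
      · exfalso
        have h1 : pvLexLtP (pvKey opts sw c) (pvKey opts sw c') :=
          hBmax c hco (by
            by_contra hx
            exact absurd (pvFg_not_mem sw c hx) (by omega)) hcc hAc
        have h2 : pvLexLtP (pvKey opts sw c') (pvKey opts sw c) := by
          rw [hAp]
          rw [hAp] at hc1
          exact pvA_max sw c p1 p2 hA1 hA2 c' hc1 (fun he => hcc he.symm)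
        unfold pvLexLtP at h1 h2
        omega
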